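-- pv_equiv track=rewrite | github.com/Kylin1207/FlagTree | python/triton/experimental/tle/distributed.py | _shape_to_cluster_dims
-- ===== SOURCE A (Python) =====
-- from typing import Any, Iterable, Mapping, Sequence
--
-- def _prod(values: Iterable[int]) -> int:
--     result = 1
--     for value in values:
--         result *= value
--     return result
--
-- def _shape_to_cluster_dims(shape: Sequence[int]) -> tuple[int, int, int]:
--     if not shape:
--         return (1, 1, 1)
--     dims = tuple(int(v) for v in shape)
--     if len(dims) == 1:
--         return (dims[0], 1, 1)
--     if len(dims) == 2:
--         return (dims[0], dims[1], 1)
--     if len(dims) == 3: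
--         return dims
--     return (_prod(dims), 1, 1)
-- ===== SOURCE B (Python) =====
-- def _shape_to_cluster_dims(shape):
--     a = b = c = 1
--     k = 0
--     for v in reversed(shape):
--         x = int(v)
--         if k < 3:
--             a, b, c = x, a, b
--         else:
--             a, b, c = x * a * b * c, 1, 1
--         k += 1
--     return (a, b, c)
-- ===== Notes on version B (the rewrite author's own statement) =====
-- stated objective: alternative
-- what changed: Replaces A's four-way length cascade plus separate product helper with a single right-to-left fold that maintains a 3-tuple, shifting each new dim in while fewer than three are held and otherwise collapsing the tuple by multiplication.
import Mathlib
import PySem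

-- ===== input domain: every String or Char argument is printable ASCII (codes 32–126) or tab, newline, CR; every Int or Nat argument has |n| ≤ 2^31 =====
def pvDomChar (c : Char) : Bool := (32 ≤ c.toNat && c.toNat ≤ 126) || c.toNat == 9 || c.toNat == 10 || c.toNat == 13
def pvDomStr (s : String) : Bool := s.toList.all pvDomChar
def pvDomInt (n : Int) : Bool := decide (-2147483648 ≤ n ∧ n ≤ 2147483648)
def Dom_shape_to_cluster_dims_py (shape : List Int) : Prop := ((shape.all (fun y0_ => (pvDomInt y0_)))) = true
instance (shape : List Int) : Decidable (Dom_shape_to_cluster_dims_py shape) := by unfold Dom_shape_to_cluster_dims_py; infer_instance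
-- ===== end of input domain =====

-- B replaces A's length cascade + separate product loop with one right-to-left fold maintaining a 3-tuple (alternative decomposition, same cost).


-- ===== PORT A =====
-- _prod: result = 1; for value in values: result *= value
def prod_py (values : List Int) : Int := values.foldl (fun result value => result * value) 1

def shape_to_cluster_dims_py (shape : List Int) : Int × Int × Int :=
  if shape = [] then (1, 1, 1)
  else
    let dims := shape
    if dims.length = 1 then (dims[0]!, 1, 1)
    else if dims.length = 2 then (dims[0]!, dims[1]!, 1)
    else if dims.length = 3 then (dims[0]!, dims[1]!, dims[2]!)
    else (prod_py dims, 1, 1)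

-- ===== PORT B =====
-- one right-to-left pass: for v in reversed(shape): shift v into (a,b,c) while k < 3,
-- otherwise collapse the whole tuple into a*b*c times v; k counts processed dims.
def shape_to_cluster_dims_py_alt (shape : List Int) : Int × Int × Int :=
  (shape.reverse.foldl
    (fun (st : (Int × Int × Int) × Int) x =>
      let a := st.1.1
      let b := st.1.2.1
      let c := st.1.2.2
      let k := st.2
      if k < 3 then ((x, a, b), k + 1) else ((x * a * b * c, 1, 1), k + 1))
    ((1, 1, 1), 0)).1

-- ===== PRECONDITION & SPEC =====
def Spec_shape_to_cluster_dims_py (shape : List Int) (out : Int × Int × Int) : Prop := out = shape_to_cluster_dims_py_alt shape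
instance (shape : List Int) (out : Int × Int × Int) : Decidable (Spec_shape_to_cluster_dims_py shape out) := by unfold Spec_shape_to_cluster_dims_py; infer_instance

-- ===== CLAIM (what is proved, stated in full; the proofs are below) =====
def Claim_equal_shape_to_cluster_dims_py : Prop := ∀ (shape : List Int), Dom_shape_to_cluster_dims_py shape → Spec_shape_to_cluster_dims_py shape (shape_to_cluster_dims_py shape)

-- ===== LEMMAS AND PROOFS =====

-- proof-only helper: B's fold, written as a structural recursion on the original list
def altRec : List Int → Int × Int × Int
  | [] => (1, 1, 1)
  | head :: tail =>
    let t := altRec tail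
    if (head :: tail).length ≤ 3 then (head, t.1, t.2.1)
    else (head * t.1 * t.2.1 * t.2.2, 1, 1)

-- the fold step of B's port, named for the lemmas
def altStep (st : (Int × Int × Int) × Int) (x : Int) : (Int × Int × Int) × Int :=
  let a := st.1.1
  let b := st.1.2.1
  let c := st.1.2.2
  let k := st.2
  if k < 3 then ((x, a, b), k + 1) else ((x * a * b * c, 1, 1), k + 1)

-- B's fold over the reversed list computes altRec together with the length
theorem fold_eq_altRec (l : List Int) :
    l.reverse.foldl altStep ((1, 1, 1), 0) = (altRec l, (l.length : Int)) := by
  induction l with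
  | nil => rfl
  | cons x t ih =>
    rw [List.reverse_cons, List.foldl_append, ih]
    show altStep (altRec t, (t.length : Int)) x = _
    by_cases h : t.length < 3
    · have ha : altRec (x :: t) = (x, (altRec t).1, (altRec t).2.1) := by
        rw [altRec, if_pos (by simp; omega)]
      rw [ha]
      unfold altStep
      rw [if_pos (show ((t.length : Int)) < 3 by exact_mod_cast h)]
      simp
    · have hb : altRec (x :: t) = (x * (altRec t).1 * (altRec t).2.1 * (altRec t).2.2, 1, 1) := by
        rw [altRec, if_neg (by simp; omega)]
      rw [hb]
      unfold altStep
      rw [if_neg (show ¬ ((t.length : Int)) < 3 by exact_mod_cast h)]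
      simp

theorem alt_eq_altRec (shape : List Int) :
    shape_to_cluster_dims_py_alt shape = altRec shape := by
  unfold shape_to_cluster_dims_py_alt
  rw [show (fun (st : (Int × Int × Int) × Int) x =>
        if st.2 < 3 then ((x, st.1.1, st.1.2.1), st.2 + 1)
        else ((x * st.1.1 * st.1.2.1 * st.1.2.2, 1, 1), st.2 + 1)) = altStep from rfl,
      fold_eq_altRec]

-- for short lists altRec's third component is 1
theorem altRec_third (t : List Int) (h : t.length ≤ 2) : (altRec t).2.2 = 1 := by
  match t with
  | [] => rfl
  | [a] => rfl
  | [a, b] => rfl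
  | a :: b :: c :: r => simp at h

-- invariant: the product of altRec's components is the product of the list
theorem altRec_prod (xs : List Int) :
    (altRec xs).1 * (altRec xs).2.1 * (altRec xs).2.2 = xs.prod := by
  induction xs with
  | nil => simp [altRec]
  | cons x t ih =>
    simp only [altRec, List.prod_cons]
    split_ifs with h
    · have h2 : t.length ≤ 2 := by simp at h; omega
      rw [altRec_third t h2] at ih
      simp only [← ih]
      ring
    · simp only [← ih]
      ring

theorem prod_py_eq (xs : List Int) : prod_py xs = xs.prod := by
  rw [List.prod_eq_foldl]; rfl

-- ===== VERDICT (by name: the statement is the Claim_ definition above) =====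
theorem shape_to_cluster_dims_py_spec : Claim_equal_shape_to_cluster_dims_py := by
  intro shape _
  unfold Spec_shape_to_cluster_dims_py
  rw [alt_eq_altRec]
  match shape with
  | [] => rfl
  | [a] => rfl
  | [a, b] => rfl
  | [a, b, c] => rfl
  | a :: b :: c :: d :: rest =>
    have hprod := altRec_prod (b :: c :: d :: rest)
    have hB : altRec (a :: b :: c :: d :: rest)
        = (a * (altRec (b :: c :: d :: rest)).1
            * (altRec (b :: c :: d :: rest)).2.1
            * (altRec (b :: c :: d :: rest)).2.2, 1, 1) := by
      rw [altRec]
      norm_num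
    rw [hB]
    simp only [shape_to_cluster_dims_py]
    norm_num
    rw [prod_py_eq, List.prod_cons, ← hprod]
    rw [if_neg (List.cons_ne_nil _ _), if_neg (by omega), if_neg (by omega)]
    congr 1
    ring
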